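-- pv_equiv track=rewrite | github.com/chh4031/Python_Study | 코딩테스트/Coding_Test_EX181.py | solution
-- ===== SOURCE A (Python) =====
-- def solution(numLog):
--     result = []
--     for i in range(len(numLog)-1):
--         if (numLog[i] + 1) == numLog[i+1]:
--             result.append("w")
--         elif (numLog[i] - 1) == numLog[i+1]:
--             result.append("s")
--         elif (numLog[i] + 10) == numLog[i+1]:
--             result.append("d")
--         else:
--             result.append("a")
--     resultString = ""
--     for i in result:
--         resultString += i
--     return resultString
-- ===== SOURCE B (Python) =====
-- def solution(numLog):
--     log = list(numLog)
--     rev = []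
--     while len(log) >= 2:
--         b = log.pop()
--         d = b - log[-1]
--         rev.append("w" if d == 1 else "s" if d == -1 else "d" if d == 10 else "a")
--     return "".join(reversed(rev))
-- ===== Notes on version B (the rewrite author's own statement) =====
-- stated objective: alternative
-- what changed: Instead of A's forward index loop over range(len-1) with an if/elif cascade plus a second string-concatenation loop, B consumes a working copy of the list destructively from the END (pop), emitting the direction characters in reverse order into a list and producing the answer with one join over the reversed list.
import Mathlib
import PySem

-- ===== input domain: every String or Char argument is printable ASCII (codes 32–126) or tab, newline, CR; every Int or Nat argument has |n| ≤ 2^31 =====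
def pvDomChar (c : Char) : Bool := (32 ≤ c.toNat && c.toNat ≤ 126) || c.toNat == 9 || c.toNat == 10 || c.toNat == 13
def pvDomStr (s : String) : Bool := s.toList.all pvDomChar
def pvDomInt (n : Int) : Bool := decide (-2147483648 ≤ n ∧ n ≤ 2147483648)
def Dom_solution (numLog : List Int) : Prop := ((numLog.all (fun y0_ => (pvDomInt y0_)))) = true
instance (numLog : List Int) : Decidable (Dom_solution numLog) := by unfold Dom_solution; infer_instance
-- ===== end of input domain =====

-- B replaces A's forward index loop + if/elif cascade + second concatenation loop by a
-- destructive back-to-front consumption: pop from the end, collect characters reversed,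
-- join the reversed list once (alternative decomposition; same cost).

-- ===== PORT A =====
def solution (numLog : List Int) : String :=
  let result := (PySem.List.pyRange 0 ((numLog.length : Int) - 1) 1).foldl
    (fun acc i =>
      if PySem.List.pyGetD numLog i 0 + 1 = PySem.List.pyGetD numLog (i + 1) 0 then acc ++ ["w"]
      else if PySem.List.pyGetD numLog i 0 - 1 = PySem.List.pyGetD numLog (i + 1) 0 then acc ++ ["s"]
      else if PySem.List.pyGetD numLog i 0 + 10 = PySem.List.pyGetD numLog (i + 1) 0 then acc ++ ["d"]
      else acc ++ ["a"]) ([] : List String)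
  result.foldl (fun s c => s ++ c) ""

-- ===== PORT B =====
-- Python while-loop: pop the last element, compare with the new last, append the char to rev.
def bLoop (log : List Int) (rev : List String) : List String :=
  if _h : 2 ≤ log.length then
    let b := log.getLastD 0          -- log.pop() (list nonempty here, so total)
    let log' := log.dropLast
    let d := b - log'.getLastD 0     -- log[-1] after the pop
    bLoop log' (rev ++ [if d = 1 then "w" else if d = -1 then "s" else if d = 10 then "d" else "a"])
  else rev
termination_by log.length
decreasing_by simp [List.length_dropLast]; omega

def solution_alt (numLog : List Int) : String :=
  String.join (bLoop numLog []).reverse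

-- ===== PRECONDITION & SPEC =====
def Spec_solution (numLog : List Int) (out : String) : Prop := out = solution_alt numLog
instance (numLog : List Int) (out : String) : Decidable (Spec_solution numLog out) := by unfold Spec_solution; infer_instance

-- ===== CLAIM (what is proved, stated in full; the proofs are below) =====
def Claim_equal_solution : Prop := ∀ (numLog : List Int), Dom_solution numLog → Spec_solution numLog (solution numLog)

-- ===== LEMMAS AND PROOFS =====

def pvChar (a b : Int) : String :=
  if a + 1 = b then "w" else if a - 1 = b then "s" else if a + 10 = b then "d" else "a"

def pvChars (xs : List Int) : List String :=
  (xs.zip (xs.drop 1)).map (fun p => pvChar p.1 p.2)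

theorem pvChars_cons (x : Int) (t : List Int) (ht : t ≠ []) :
    pvChars (x :: t) = pvChar x (t.headD 0) :: pvChars t := by
  cases t with
  | nil => exact absurd rfl ht
  | cons y r => simp [pvChars]

theorem pvChars_append_last (l : List Int) (b : Int) (hl : l ≠ []) :
    pvChars (l ++ [b]) = pvChars l ++ [pvChar (l.getLastD 0) b] := by
  induction l with
  | nil => exact absurd rfl hl
  | cons x t ih =>
    cases t with
    | nil => simp [pvChars, pvChar]
    | cons y r =>
      have ht : (y :: r : List Int) ≠ [] := by simp
      have h1 : ((x :: y :: r : List Int) ++ [b]) = x :: ((y :: r) ++ [b]) := by simp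
      rw [h1, pvChars_cons x ((y :: r) ++ [b]) (by simp),
          pvChars_cons x (y :: r) ht, ih ht]
      simp [List.getLastD]

theorem bLoop_eq (log : List Int) (rev : List String) :
    bLoop log rev = rev ++ (pvChars log).reverse := by
  by_cases h : 2 ≤ log.length
  · obtain ⟨l, b, hlb⟩ : ∃ l b, log = l ++ [b] := by
      cases hlast : log.getLast? with
      | none => simp [List.getLast?_eq_none_iff] at hlast; simp [hlast] at h
      | some b => exact ⟨log.dropLast, b, (List.dropLast_append_getLast?
          (l := log) b hlast).symm⟩
    have hl : l ≠ [] := by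
      intro he; rw [hlb, he] at h; simp at h
    have hlen : (l ++ [b]).dropLast = l := by simp
    rw [bLoop, dif_pos h]
    simp only [hlb, hlen, List.getLastD_concat]
    rw [bLoop_eq l]
    rw [pvChars_append_last l b hl]
    have hch : (if b - l.getLastD 0 = 1 then "w" else if b - l.getLastD 0 = -1 then "s"
         else if b - l.getLastD 0 = 10 then "d" else "a")
        = pvChar (l.getLastD 0) b := by
      unfold pvChar
      split_ifs <;> first | rfl | omega
    rw [hch]
    simp
  · rw [bLoop, dif_neg h]
    have : pvChars log = [] := by
      match log, h with
      | [], _ => rfl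
      | [x], _ => rfl
      | x :: y :: r, h => exact absurd (by simp) h
    simp [this]
termination_by log.length
decreasing_by
  rw [hlb]; simp

theorem pv_range_zip (xs : List Int) :
    (List.range (xs.length - 1)).map (fun i => pvChar (xs.getD i 0) (xs.getD (i + 1) 0))
      = (xs.zip (xs.drop 1)).map (fun p => pvChar p.1 p.2) := by
  induction xs with
  | nil => simp
  | cons x ys ih =>
    cases ys with
    | nil => simp
    | cons y zs =>
      have h : (x :: y :: zs).length - 1 = ((y :: zs).length - 1) + 1 := by simp
      rw [h, List.range_succ_eq_map, List.map_cons, List.map_map]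
      simp only [Function.comp_def, Nat.succ_eq_add_one, List.getD_cons_succ,
        List.getD_cons_zero] at ih ⊢
      rw [ih]
      simp [List.zip_cons_cons]

theorem string_join_eq_foldl (l : List String) :
    l.foldl (fun s c => s ++ c) "" = String.join l := by
  simp [String.join]

theorem solution_eq (xs : List Int) : solution xs = solution_alt xs := by
  unfold solution solution_alt
  rw [bLoop_eq, List.nil_append, List.reverse_reverse]
  have hfun : ∀ (acc : List String) (i : Int),
      (if PySem.List.pyGetD xs i 0 + 1 = PySem.List.pyGetD xs (i + 1) 0 then acc ++ ["w"]
       else if PySem.List.pyGetD xs i 0 - 1 = PySem.List.pyGetD xs (i + 1) 0 then acc ++ ["s"]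
       else if PySem.List.pyGetD xs i 0 + 10 = PySem.List.pyGetD xs (i + 1) 0 then acc ++ ["d"]
       else acc ++ ["a"])
      = acc ++ [pvChar (PySem.List.pyGetD xs i 0) (PySem.List.pyGetD xs (i + 1) 0)] := by
    intro acc i; unfold pvChar; split_ifs <;> rfl
  simp only [hfun]
  rw [PySem.List.foldl_append_singleton_eq_map]
  cases xs with
  | nil => simp [pvChars, String.join]
  | cons x ys =>
    have hlen : ((x :: ys).length : Int) - 1 = (((x :: ys).length - 1 : Nat) : Int) := by
      simp
    rw [hlen, PySem.List.pyRange_zero_natCast, List.map_map]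
    have hmap : ((fun i : Int => pvChar (PySem.List.pyGetD (x :: ys) i 0)
          (PySem.List.pyGetD (x :: ys) (i + 1) 0)) ∘ (fun n : Nat => (n : Int)))
        = fun n : Nat => pvChar ((x :: ys).getD n 0) ((x :: ys).getD (n + 1) 0) := by
      funext n
      simp only [Function.comp_def]
      rw [show ((n : Int) + 1) = ((n + 1 : Nat) : Int) from by push_cast; ring,
        PySem.List.pyGetD_natCast, PySem.List.pyGetD_natCast]
    rw [hmap]
    simp only [List.nil_append]
    rw [pv_range_zip, string_join_eq_foldl]
    rfl

-- ===== VERDICT (by name: the statement is the Claim_ definition above) =====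
theorem solution_spec : Claim_equal_solution := by
  intro numLog _
  unfold Spec_solution
  exact solution_eq numLog
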